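-- pv_equiv track=rewrite | github.com/DancingOnAir/LeetcodePythonSolution | String/0936_stamping_the_sequence.py | movesToStamp2
-- ===== SOURCE A (Python) =====
-- def movesToStamp2(stamp, target):
--     n, m, t, s, res = len(target), len(stamp), list(target), list(stamp), list()
--
--     def check(i):
--         changed = False
--         for j in range(m):
--             if t[i + j] == '?':
--                 continue
--             if t[i + j] != s[j]:
--                 return False
--             changed = True
--         if changed:
--             t[i: i + m] = ['?'] * m
--             res.append(i)
--         return changed
--
--     changed = True
--     while changed:
--         changed = False
--         for i in range(n - m + 1):
--             changed |= check(i)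
--     return res[::-1] if t == ['?'] * n else []
-- ===== SOURCE B (Python) =====
-- def movesToStamp2(stamp, target):
--     n, m = len(target), len(stamp)
--     t = list(target)
--     W = n - m + 1 if n - m + 1 > 0 else 0
--     # per-window counts: mis[w] = mismatching non-'?' chars, q[w] = '?' chars
--     mis = [sum(1 for j in range(m) if t[w + j] != '?' and t[w + j] != stamp[j])
--            for w in range(W)]
--     q = [sum(1 for j in range(m) if t[w + j] == '?') for w in range(W)]
--     res = []
--     changed = True
--     while changed:
--         changed = False
--         for i in range(W):
--             if mis[i] == 0 and q[i] < m:
--                 res.append(i)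
--                 changed = True
--                 for k in range(i, i + m):
--                     c = t[k]
--                     if c != '?':
--                         t[k] = '?'
--                         lo = k - m + 1 if k - m + 1 > 0 else 0
--                         hi = k if k < W - 1 else W - 1
--                         for w in range(lo, hi + 1):
--                             q[w] += 1
--                             if c != stamp[k - w]:
--                                 mis[w] -= 1
--     return res[::-1] if all(c == '?' for c in t) else []
-- ===== Notes on version B (the rewrite author's own statement) =====
-- stated objective: alternative
-- what changed: Instead of re-scanning each m-char window on every pass, B precomputes per-window mismatch and '?'-counts, tests stampability of a window by two counter lookups, and updates the counters incrementally when positions are blanked, keeping A's left-to-right pass order and hence the exact output.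
import Mathlib
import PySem

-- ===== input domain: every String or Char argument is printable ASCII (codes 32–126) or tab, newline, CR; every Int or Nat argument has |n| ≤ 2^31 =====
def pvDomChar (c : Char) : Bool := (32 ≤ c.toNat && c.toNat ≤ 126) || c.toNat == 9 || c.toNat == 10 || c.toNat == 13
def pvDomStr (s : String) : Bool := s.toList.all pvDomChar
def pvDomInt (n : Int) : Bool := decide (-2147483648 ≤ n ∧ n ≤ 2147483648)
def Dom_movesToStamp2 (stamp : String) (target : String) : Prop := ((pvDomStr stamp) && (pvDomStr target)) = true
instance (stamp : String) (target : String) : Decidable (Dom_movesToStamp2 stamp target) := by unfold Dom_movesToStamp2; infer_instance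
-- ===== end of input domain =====

-- B replaces A's per-pass window re-scans by per-window mismatch/'?' counters, updated
-- incrementally as positions are blanked, with A's pass order kept (same cost class overall).
-- Both Pythons mutate only local state; the equivalence proved is about the return value.

-- ===== PORT A =====
-- A's check(i): the j-loop with early `return False` modeled by the absorbing `none` state;
-- `some changed` carries the running `changed` flag (indices i+j, j are always in range).
def pvCheckA (s t : List Char) (i : Nat) : Option Bool :=
  (List.range s.length).foldl
    (fun st j =>
      st.bind (fun changed =>
        if t.getD (i + j) '?' = '?' then some changed
        else if t.getD (i + j) '?' ≠ s.getD j '?' then none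
        else some true))
    (some false)

-- t[i : i + m] = ['?'] * m
def pvStamp (t : List Char) (i m : Nat) : List Char :=
  t.take i ++ List.replicate m '?' ++ t.drop (i + m)

-- one run of `for i in range(n - m + 1): changed |= check(i)` over the state (t, res, changed)
def pvPassA (s : List Char) (W : Nat)
    (st : List Char × List Int × Bool) : List Char × List Int × Bool :=
  (List.range W).foldl
    (fun st i =>
      match pvCheckA s st.1 i with
      | some true => (pvStamp st.1 i s.length, st.2.1 ++ [(i : Int)], true)
      | _ => st) st

-- the `while changed` loop; fuel n+2 always suffices: every iteration except the last
-- turns at least one non-'?' character into '?', so there are at most n+1 iterations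
def pvLoopA (s : List Char) (W : Nat) :
    Nat → List Char × List Int → List Char × List Int
  | 0, st => st
  | fuel+1, st =>
    let st' := pvPassA s W (st.1, st.2, false)
    if st'.2.2 then pvLoopA s W fuel (st'.1, st'.2.1) else (st'.1, st'.2.1)

def movesToStamp2 (stamp : String) (target : String) : List Int :=
  let s := stamp.toList
  let t := target.toList
  let n := t.length
  -- Python's range(n - m + 1) is empty for m > n, hence W = n + 1 - m (Nat truncation)
  let r := pvLoopA s (n + 1 - s.length) (n + 2) (t, [])
  if r.1 = List.replicate n '?' then r.2.reverse else []

-- ===== PORT B =====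
-- mis[w] = number of j with t[w+j] neither '?' nor stamp[j];  q[w] = number of '?' in window w
def pvMis (s t : List Char) (w : Nat) : Nat :=
  (List.range s.length).countP
    (fun j => decide (t.getD (w + j) '?' ≠ '?' ∧ t.getD (w + j) '?' ≠ s.getD j '?'))

def pvQ (t : List Char) (m w : Nat) : Nat :=
  (List.range m).countP (fun j => decide (t.getD (w + j) '?' = '?'))

-- `for w in range(lo, hi+1)`: update q and mis of the windows overlapping position k,
-- whose character changes from c (≠ '?') to '?'
def pvUpd (s : List Char) (W : Nat) (c : Char) (k : Nat)
    (mq : List Nat × List Nat) : List Nat × List Nat :=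
  (List.range' (k + 1 - s.length) (min (k + 1) W - (k + 1 - s.length))).foldl
    (fun mq w =>
      ((if c ≠ s.getD (k - w) '?' then mq.1.set w (mq.1.getD w 0 - 1) else mq.1),
       mq.2.set w (mq.2.getD w 0 + 1)))
    mq

-- `for k in range(i, i+m)`: blank each non-'?' position of window i, updating the counts
def pvStampB (s : List Char) (W i : Nat)
    (st : List Char × List Nat × List Nat) : List Char × List Nat × List Nat :=
  (List.range' i s.length).foldl
    (fun st k =>
      if st.1.getD k '?' = '?' then st
      else (st.1.set k '?', pvUpd s W (st.1.getD k '?') k (st.2.1, st.2.2)))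
    st

-- one pass of B's `for i in range(W)` with the counter test mis[i] == 0 and q[i] < m
def pvPassB (s : List Char) (W : Nat)
    (st : (List Char × List Nat × List Nat) × List Int × Bool) :
    (List Char × List Nat × List Nat) × List Int × Bool :=
  (List.range W).foldl
    (fun st i =>
      if st.1.2.1.getD i 0 = 0 ∧ st.1.2.2.getD i 0 < s.length then
        (pvStampB s W i st.1, st.2.1 ++ [(i : Int)], true)
      else st) st

def pvLoopB (s : List Char) (W : Nat) :
    Nat → (List Char × List Nat × List Nat) × List Int →
    (List Char × List Nat × List Nat) × List Int
  | 0, st => st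
  | fuel+1, st =>
    let st' := pvPassB s W (st.1, st.2, false)
    if st'.2.2 then pvLoopB s W fuel (st'.1, st'.2.1) else (st'.1, st'.2.1)

def movesToStamp2_alt (stamp : String) (target : String) : List Int :=
  let s := stamp.toList
  let t := target.toList
  let n := t.length
  let W := n + 1 - s.length
  let mis := (List.range W).map (fun w => pvMis s t w)
  let q := (List.range W).map (fun w => pvQ t s.length w)
  let r := pvLoopB s W (n + 2) ((t, mis, q), [])
  if r.1.1.all (fun c => c == '?') then r.2.reverse else []

-- ===== PRECONDITION & SPEC =====
def Spec_movesToStamp2 (stamp : String) (target : String) (out : List Int) : Prop := out = movesToStamp2_alt stamp target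
instance (stamp : String) (target : String) (out : List Int) : Decidable (Spec_movesToStamp2 stamp target out) := by unfold Spec_movesToStamp2; infer_instance

-- ===== CLAIM (what is proved, stated in full; the proofs are below) =====
def Claim_equal_movesToStamp2 : Prop := ∀ (stamp : String) (target : String), Dom_movesToStamp2 stamp target → Spec_movesToStamp2 stamp target (movesToStamp2 stamp target)

-- ===== LEMMAS AND PROOFS =====
-- The invariant: B's count lists are exactly the per-window counts pvMis/pvQ of the current text.
def pvMisVec (s t : List Char) (W : Nat) : List Nat := (List.range W).map (fun w => pvMis s t w)
def pvQVec (t : List Char) (m W : Nat) : List Nat := (List.range W).map (fun w => pvQ t m w)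


theorem pv_getD_set {α : Type} (l : List α) (k j : Nat) (c d : α) :
    (l.set k c).getD j d = if j = k ∧ k < l.length then c else l.getD j d := by
  rw [List.getD_eq_getElem?_getD, List.getD_eq_getElem?_getD, List.getElem?_set]
  by_cases h1 : k = j
  · subst h1
    by_cases h2 : k < l.length
    · simp [h2]
    · have hn : l[k]? = none := List.getElem?_eq_none (by omega)
      simp [h2, hn]
  · simp only [h1, if_false]
    rw [if_neg (fun h => h1 h.1.symm)]

theorem pv_getD_map_range {α : Type} (f : Nat → α) (W i : Nat) (d : α) :
    ((List.range W).map f).getD i d = if i < W then f i else d := by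
  rw [List.getD_eq_getElem?_getD, List.getElem?_map]
  by_cases h : i < W
  · simp [List.getElem?_range, h]
  · rw [List.getElem?_eq_none (by simpa using h)]
    simp [h]

theorem pv_eq_of_getD {α : Type} (l1 l2 : List α) (d : α) (hl : l1.length = l2.length)
    (h : ∀ i, l1.getD i d = l2.getD i d) : l1 = l2 := by
  apply List.ext_getElem hl
  intro i h1 h2
  have hh := h i
  rwa [List.getD_eq_getElem _ _ h1, List.getD_eq_getElem _ _ h2] at hh

theorem pv_checkA_go (s t : List Char) (i : Nat) (k : Nat) :
    (List.range k).foldl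
      (fun st j =>
        st.bind (fun changed =>
          if t.getD (i + j) '?' = '?' then some changed
          else if t.getD (i + j) '?' ≠ s.getD j '?' then none
          else some true))
      (some false)
    = (if (List.range k).countP (fun j => decide (t.getD (i + j) '?' ≠ '?' ∧ t.getD (i + j) '?' ≠ s.getD j '?')) = 0
       then some (decide ((List.range k).countP (fun j => decide (t.getD (i + j) '?' = '?')) < k))
       else none) := by
  induction k with
  | zero => simp
  | succ k ih =>
    rw [List.range_succ, List.foldl_append, List.countP_append, List.countP_append, ih]
    have hq : (List.range k).countP (fun j => decide (t.getD (i + j) '?' = '?')) <= k := by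
      have := List.countP_le_length (p := fun j => decide (t.getD (i + j) '?' = '?')) (l := List.range k)
      simpa using this
    by_cases hmis : (List.range k).countP (fun j => decide (t.getD (i + j) '?' ≠ '?' ∧ t.getD (i + j) '?' ≠ s.getD j '?')) = 0
    · rw [if_pos hmis]
      simp only [List.foldl_cons, List.foldl_nil, Option.bind_some]
      by_cases hc : t.getD (i + k) '?' = '?'
      · have a1 : List.countP (fun j => decide (t.getD (i + j) '?' ≠ '?' ∧ t.getD (i + j) '?' ≠ s.getD j '?')) [k] = 0 := by
          simp only [List.countP_cons, List.countP_nil]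
          rw [decide_eq_false (fun h => h.1 hc)]
          rfl
        have a2 : List.countP (fun j => decide (t.getD (i + j) '?' = '?')) [k] = 1 := by
          simp only [List.countP_cons, List.countP_nil]
          rw [decide_eq_true hc]
          rfl
        rw [if_pos hc, a1, a2, if_pos (by omega)]
        congr 1
        rw [decide_eq_decide]
        omega
      · by_cases hms : t.getD (i + k) '?' = s.getD k '?'
        · have a1 : List.countP (fun j => decide (t.getD (i + j) '?' ≠ '?' ∧ t.getD (i + j) '?' ≠ s.getD j '?')) [k] = 0 := by
            simp only [List.countP_cons, List.countP_nil]
            rw [decide_eq_false (fun h => h.2 hms)]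
            rfl
          have a2 : List.countP (fun j => decide (t.getD (i + j) '?' = '?')) [k] = 0 := by
            simp only [List.countP_cons, List.countP_nil]
            rw [decide_eq_false hc]
            rfl
          rw [if_neg hc, if_neg (fun h => h hms), a1, a2, if_pos (by omega)]
          congr 1
          rw [eq_comm, decide_eq_true_iff]
          omega
        · have a1 : List.countP (fun j => decide (t.getD (i + j) '?' ≠ '?' ∧ t.getD (i + j) '?' ≠ s.getD j '?')) [k] = 1 := by
            simp only [List.countP_cons, List.countP_nil]
            rw [decide_eq_true (And.intro hc hms)]
            rfl
          rw [if_neg hc, if_pos hms, a1, if_neg (by omega)]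
    · rw [if_neg hmis]
      simp only [List.foldl_cons, List.foldl_nil, Option.bind_none]
      rw [if_neg (by omega)]

theorem pv_checkA_eq (s t : List Char) (i : Nat) :
    pvCheckA s t i
    = (if pvMis s t i = 0 then some (decide (pvQ t s.length i < s.length)) else none) := by
  exact pv_checkA_go s t i s.length

theorem pv_countP_set_nooverlap (t : List Char) (k : Nat) (c' : Char) (w m : Nat)
    (p : Nat → Char → Bool) (h : k < w ∨ w + m ≤ k) :
    (List.range m).countP (fun j => p j ((t.set k c').getD (w + j) '?'))
      = (List.range m).countP (fun j => p j (t.getD (w + j) '?')) := by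
  apply List.countP_congr
  intro j hj
  rw [List.mem_range] at hj
  rw [pv_getD_set]
  rw [if_neg (by omega)]

theorem pv_countP_set_overlap (t : List Char) (k : Nat) (hk : k < t.length) (c' : Char)
    (w m : Nat) (p : Nat → Char → Bool) (h1 : w ≤ k) (h2 : k < w + m) :
    (List.range m).countP (fun j => p j ((t.set k c').getD (w + j) '?'))
        + (if p (k - w) (t.getD k '?') then 1 else 0)
      = (List.range m).countP (fun j => p j (t.getD (w + j) '?'))
        + (if p (k - w) c' then 1 else 0) := by
  induction m with
  | zero => omega
  | succ m ih =>
    rw [List.range_succ, List.countP_append, List.countP_append]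
    by_cases he : k = w + m
    · rw [pv_countP_set_nooverlap t k c' w m p (by omega)]
      have e1 : (t.set k c').getD (w + m) '?' = c' := by
        rw [pv_getD_set, if_pos (And.intro he.symm hk)]
      have e2 : k - w = m := by omega
      have e3 : t.getD k '?' = t.getD (w + m) '?' := by rw [he]
      simp only [List.countP_cons, List.countP_nil, Nat.zero_add]
      rw [e1, e2, ← e3]
      split_ifs <;> omega
    · have e : (t.set k c').getD (w + m) '?' = t.getD (w + m) '?' := by
        rw [pv_getD_set, if_neg (by omega)]
      simp only [List.countP_cons, List.countP_nil, Nat.zero_add]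
      rw [e]
      have := ih (by omega)
      split_ifs at this ⊢ <;> omega

theorem pv_updFold (s : List Char) (c : Char) (k : Nat) :
    ∀ (l : List Nat) (mis q : List Nat), l.Nodup → (∀ w ∈ l, w < mis.length ∧ w < q.length) →
    ((l.foldl (fun mq w =>
        ((if c ≠ s.getD (k - w) '?' then mq.1.set w (mq.1.getD w 0 - 1) else mq.1),
         mq.2.set w (mq.2.getD w 0 + 1))) (mis, q)).1.length = mis.length ∧
     (l.foldl (fun mq w =>
        ((if c ≠ s.getD (k - w) '?' then mq.1.set w (mq.1.getD w 0 - 1) else mq.1),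
         mq.2.set w (mq.2.getD w 0 + 1))) (mis, q)).2.length = q.length ∧
     (∀ w', (l.foldl (fun mq w =>
        ((if c ≠ s.getD (k - w) '?' then mq.1.set w (mq.1.getD w 0 - 1) else mq.1),
         mq.2.set w (mq.2.getD w 0 + 1))) (mis, q)).1.getD w' 0
          = if w' ∈ l ∧ c ≠ s.getD (k - w') '?' then mis.getD w' 0 - 1 else mis.getD w' 0) ∧
     (∀ w', (l.foldl (fun mq w =>
        ((if c ≠ s.getD (k - w) '?' then mq.1.set w (mq.1.getD w 0 - 1) else mq.1),
         mq.2.set w (mq.2.getD w 0 + 1))) (mis, q)).2.getD w' 0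
          = if w' ∈ l then q.getD w' 0 + 1 else q.getD w' 0)) := by
  intro l
  induction l with
  | nil => intro mis q _ _; simp
  | cons w0 tl ih =>
    intro mis q hnd hb
    have hw0 : w0 < mis.length ∧ w0 < q.length := hb w0 (by simp)
    have hnotin : w0 ∉ tl := (List.nodup_cons.mp hnd).1
    simp only [List.foldl_cons]
    set mis' := (if c ≠ s.getD (k - w0) '?' then mis.set w0 (mis.getD w0 0 - 1) else mis) with hmis'
    have hmlen : mis'.length = mis.length := by
      rw [hmis']; split_ifs <;> simp
    have hqlen : (q.set w0 (q.getD w0 0 + 1)).length = q.length := by simp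
    have hb' : ∀ w ∈ tl, w < mis'.length ∧ w < (q.set w0 (q.getD w0 0 + 1)).length := by
      intro w hw
      rw [hmlen, hqlen]
      exact hb w (List.mem_cons_of_mem _ hw)
    obtain ⟨ih1, ih2, ih3, ih4⟩ := ih mis' (q.set w0 (q.getD w0 0 + 1)) (List.nodup_cons.mp hnd).2 hb'
    refine ⟨by rw [ih1, hmlen], by rw [ih2, hqlen], ?_, ?_⟩
    · intro w'
      rw [ih3 w']
      by_cases hw' : w' ∈ tl
      · have hne : w' ≠ w0 := fun h => hnotin (h ▸ hw')
        have e : mis'.getD w' 0 = mis.getD w' 0 := by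
          rw [hmis']; split_ifs with _ <;> [rw [pv_getD_set, if_neg (by tauto)]; rfl]
        by_cases hcs : c ≠ s.getD (k - w') '?'
        · rw [if_pos ⟨hw', hcs⟩, if_pos ⟨List.mem_cons_of_mem _ hw', hcs⟩, e]
        · rw [if_neg (by tauto), if_neg (by tauto), e]
      · by_cases heq : w' = w0
        · subst heq
          rw [if_neg (by tauto), hmis']
          by_cases hcs : c ≠ s.getD (k - w') '?'
          · rw [if_pos hcs, if_pos ⟨by simp, hcs⟩, pv_getD_set, if_pos ⟨rfl, hw0.1⟩]
          · rw [if_neg hcs, if_neg (by tauto)]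
        · have e : mis'.getD w' 0 = mis.getD w' 0 := by
            rw [hmis']; split_ifs with _ <;> [rw [pv_getD_set, if_neg (by tauto)]; rfl]
          rw [if_neg (by tauto), if_neg (by simp_all), e]
    · intro w'
      rw [ih4 w']
      by_cases hw' : w' ∈ tl
      · have hne : w' ≠ w0 := fun h => hnotin (h ▸ hw')
        rw [if_pos hw', if_pos (List.mem_cons_of_mem _ hw'), pv_getD_set, if_neg (by tauto)]
      · by_cases heq : w' = w0
        · subst heq
          rw [if_neg hw', if_pos (by simp), pv_getD_set, if_pos ⟨rfl, hw0.2⟩]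
        · rw [if_neg hw', if_neg (by simp_all), pv_getD_set, if_neg (by tauto)]

theorem pv_mem_window (k m W w : Nat) :
    w ∈ List.range' (k + 1 - m) (min (k + 1) W - (k + 1 - m))
      ↔ (w ≤ k ∧ k < w + m ∧ w < W) := by
  rw [List.mem_range'_1]
  omega

theorem pv_upd_spec (s t : List Char) (W : Nat) (c : Char) (k : Nat)
    (hk : k < t.length) (hc : t.getD k '?' = c) (hq : c ≠ '?')
    (hW : W = t.length + 1 - s.length) :
    pvUpd s W c k (pvMisVec s t W, pvQVec t s.length W)
      = (pvMisVec s (t.set k '?') W, pvQVec (t.set k '?') s.length W) := by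
  unfold pvUpd
  have hnd : (List.range' (k + 1 - s.length) (min (k + 1) W - (k + 1 - s.length))).Nodup :=
    List.nodup_range'
  have hb : ∀ w ∈ List.range' (k + 1 - s.length) (min (k + 1) W - (k + 1 - s.length)),
      w < (pvMisVec s t W).length ∧ w < (pvQVec t s.length W).length := by
    intro w hw
    rw [pv_mem_window] at hw
    constructor <;> simp [pvMisVec, pvQVec] <;> omega
  obtain ⟨L1, L2, L3, L4⟩ := pv_updFold s c k _ (pvMisVec s t W) (pvQVec t s.length W) hnd hb
  refine Prod.ext ?_ ?_
  · show _ = pvMisVec s (t.set k '?') W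
    apply pv_eq_of_getD _ _ 0
    · rw [L1]; simp [pvMisVec]
    · intro w'
      rw [L3 w']
      have rnew : (pvMisVec s (t.set k '?') W).getD w' 0
          = if w' < W then pvMis s (t.set k '?') w' else 0 := pv_getD_map_range _ W w' 0
      have rold : (pvMisVec s t W).getD w' 0
          = if w' < W then pvMis s t w' else 0 := pv_getD_map_range _ W w' 0
      rw [rnew, rold]
      by_cases hwW : w' < W
      · simp only [if_pos hwW]
        by_cases hov : w' ≤ k ∧ k < w' + s.length
        · have hmem : w' ∈ List.range' (k + 1 - s.length) (min (k + 1) W - (k + 1 - s.length)) := by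
            rw [pv_mem_window]; exact ⟨hov.1, hov.2, hwW⟩
          have H := pv_countP_set_overlap t k hk '?' w' s.length
            (fun j ch => decide (ch ≠ '?' ∧ ch ≠ s.getD j '?')) hov.1 hov.2
          simp only at H
          have e1 : pvMis s (t.set k '?') w'
              = (List.range s.length).countP
                  (fun j => decide ((t.set k '?').getD (w' + j) '?' ≠ '?' ∧ (t.set k '?').getD (w' + j) '?' ≠ s.getD j '?')) := rfl
          have e2 : pvMis s t w'
              = (List.range s.length).countP
                  (fun j => decide (t.getD (w' + j) '?' ≠ '?' ∧ t.getD (w' + j) '?' ≠ s.getD j '?')) := rfl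
          rw [hc, ← e1, ← e2] at H
          by_cases hcs : c = s.getD (k - w') '?'
          · simp [hq, hcs] at H
            rw [if_neg (fun h => h.2 hcs)]
            omega
          · have hcs' : ¬ c = s[k - w']?.getD '?' := by
              rw [← List.getD_eq_getElem?_getD]; exact hcs
            simp [hq, hcs, hcs'] at H
            rw [if_pos ⟨hmem, hcs⟩]
            omega
        · have hnmem : w' ∉ List.range' (k + 1 - s.length) (min (k + 1) W - (k + 1 - s.length)) := by
            rw [pv_mem_window]; tauto
          have H := pv_countP_set_nooverlap t k '?' w' s.length
            (fun j ch => decide (ch ≠ '?' ∧ ch ≠ s.getD j '?')) (by omega)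
          simp only at H
          rw [if_neg (fun h => hnmem h.1)]
          have e1 : pvMis s (t.set k '?') w'
              = (List.range s.length).countP
                  (fun j => decide ((t.set k '?').getD (w' + j) '?' ≠ '?' ∧ (t.set k '?').getD (w' + j) '?' ≠ s.getD j '?')) := rfl
          have e2 : pvMis s t w'
              = (List.range s.length).countP
                  (fun j => decide (t.getD (w' + j) '?' ≠ '?' ∧ t.getD (w' + j) '?' ≠ s.getD j '?')) := rfl
          rw [e1, e2]
          exact H.symm
      · simp only [if_neg hwW]
        have hnmem : w' ∉ List.range' (k + 1 - s.length) (min (k + 1) W - (k + 1 - s.length)) := by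
          rw [pv_mem_window]; tauto
        rw [if_neg (fun h => hnmem h.1)]
  · show _ = pvQVec (t.set k '?') s.length W
    apply pv_eq_of_getD _ _ 0
    · rw [L2]; simp [pvQVec]
    · intro w'
      rw [L4 w']
      have rnew : (pvQVec (t.set k '?') s.length W).getD w' 0
          = if w' < W then pvQ (t.set k '?') s.length w' else 0 := pv_getD_map_range _ W w' 0
      have rold : (pvQVec t s.length W).getD w' 0
          = if w' < W then pvQ t s.length w' else 0 := pv_getD_map_range _ W w' 0
      rw [rnew, rold]
      by_cases hwW : w' < W
      · simp only [if_pos hwW]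
        by_cases hov : w' ≤ k ∧ k < w' + s.length
        · have hmem : w' ∈ List.range' (k + 1 - s.length) (min (k + 1) W - (k + 1 - s.length)) := by
            rw [pv_mem_window]; exact ⟨hov.1, hov.2, hwW⟩
          have H := pv_countP_set_overlap t k hk '?' w' s.length
            (fun _ ch => decide (ch = '?')) hov.1 hov.2
          simp only at H
          have e1 : pvQ (t.set k '?') s.length w'
              = (List.range s.length).countP (fun j => decide ((t.set k '?').getD (w' + j) '?' = '?')) := rfl
          have e2 : pvQ t s.length w'
              = (List.range s.length).countP (fun j => decide (t.getD (w' + j) '?' = '?')) := rfl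
          rw [hc, ← e1, ← e2] at H
          simp [hq] at H
          rw [if_pos hmem]
          omega
        · have hnmem : w' ∉ List.range' (k + 1 - s.length) (min (k + 1) W - (k + 1 - s.length)) := by
            rw [pv_mem_window]; tauto
          have H := pv_countP_set_nooverlap t k '?' w' s.length
            (fun _ ch => decide (ch = '?')) (by omega)
          simp only at H
          rw [if_neg hnmem]
          have e1 : pvQ (t.set k '?') s.length w'
              = (List.range s.length).countP (fun j => decide ((t.set k '?').getD (w' + j) '?' = '?')) := rfl
          have e2 : pvQ t s.length w'
              = (List.range s.length).countP (fun j => decide (t.getD (w' + j) '?' = '?')) := rfl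
          rw [e1, e2]
          exact H.symm
      · simp only [if_neg hwW]
        have hnmem : w' ∉ List.range' (k + 1 - s.length) (min (k + 1) W - (k + 1 - s.length)) := by
          rw [pv_mem_window]; tauto
        rw [if_neg hnmem]

theorem pv_set_self (t : List Char) (k : Nat) (h : t.getD k '?' = '?') :
    t.set k '?' = t := by
  apply pv_eq_of_getD _ _ '?' (by simp)
  intro i
  rw [pv_getD_set]
  split_ifs with hc
  · rw [hc.1] at *; exact h.symm
  · rfl

theorem pv_stamp_length (t : List Char) (i m : Nat) (h : i + m ≤ t.length) :
    (pvStamp t i m).length = t.length := by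
  simp [pvStamp]
  omega

theorem pv_stamp_getD (t : List Char) (i m j : Nat) (h : i + m ≤ t.length) :
    (pvStamp t i m).getD j '?' = if i ≤ j ∧ j < i + m then '?' else t.getD j '?' := by
  unfold pvStamp
  rw [List.getD_eq_getElem?_getD, List.getD_eq_getElem?_getD]
  by_cases h1 : j < i
  · rw [List.getElem?_append_left (by simp; omega), List.getElem?_append_left (by simp; omega),
      List.getElem?_take]
    rw [if_pos h1, if_neg (by omega)]
  · by_cases h2 : j < i + m
    · rw [List.getElem?_append_left (by simp; omega),
        List.getElem?_append_right (by simp; omega)]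
      rw [if_pos ⟨by omega, h2⟩]
      have : (List.replicate m '?')[j - (t.take i).length]? = some '?' := by
        rw [List.getElem?_replicate, if_pos (by simp; omega)]
      rw [this]
      rfl
    · rw [List.getElem?_append_right (by simp; omega)]
      rw [if_neg (by omega)]
      have e : (t.drop (i + m))[j - (t.take i ++ List.replicate m '?').length]? = t[j]? := by
        rw [List.getElem?_drop]
        congr 1
        simp
        omega
      rw [e]

theorem pv_sets_getD (l : List Nat) : ∀ (t : List Char) (j : Nat),
    (l.foldl (fun t k => t.set k '?') t).getD j '?'
      = if j ∈ l ∧ j < t.length then '?' else t.getD j '?' := by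
  induction l with
  | nil => intro t j; simp
  | cons k tl ih =>
    intro t j
    rw [List.foldl_cons, ih]
    have hlen : (t.set k '?').length = t.length := by simp
    rw [hlen, pv_getD_set]
    by_cases h1 : j ∈ tl ∧ j < t.length
    · rw [if_pos h1, if_pos ⟨List.mem_cons_of_mem _ h1.1, h1.2⟩]
    · rw [if_neg h1]
      by_cases h2 : j = k ∧ k < t.length
      · rw [if_pos h2, if_pos ⟨by rw [h2.1]; exact List.mem_cons_self .., by omega⟩]
      · rw [if_neg h2, if_neg (by
          intro hc
          rcases List.mem_cons.mp hc.1 with h | h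
          · exact h2 ⟨h, by omega⟩
          · exact h1 ⟨h, hc.2⟩)]

theorem pv_sets_length (l : List Nat) : ∀ (t : List Char),
    (l.foldl (fun t k => t.set k '?') t).length = t.length := by
  induction l with
  | nil => intro t; rfl
  | cons k tl ih => intro t; rw [List.foldl_cons, ih]; simp

theorem pv_sets_eq_stamp (t : List Char) (i m : Nat) (h : i + m ≤ t.length) :
    (List.range' i m).foldl (fun t k => t.set k '?') t = pvStamp t i m := by
  apply pv_eq_of_getD _ _ '?'
  · rw [pv_sets_length, pv_stamp_length t i m h]
  · intro j
    rw [pv_sets_getD, pv_stamp_getD t i m j h]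
    by_cases hm : i ≤ j ∧ j < i + m
    · rw [if_pos hm, if_pos ⟨by rw [List.mem_range'_1]; omega, by omega⟩]
    · rw [if_neg hm, if_neg (by
        intro hc
        rw [List.mem_range'_1] at hc
        exact hm ⟨hc.1.1, by omega⟩)]

theorem pv_stampB_go (s : List Char) (W : Nat) (l : List Nat) :
    ∀ (t : List Char), (∀ k ∈ l, k < t.length) → W = t.length + 1 - s.length →
    l.foldl
      (fun st k =>
        if st.1.getD k '?' = '?' then st
        else (st.1.set k '?', pvUpd s W (st.1.getD k '?') k (st.2.1, st.2.2)))
      (t, pvMisVec s t W, pvQVec t s.length W)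
    = (l.foldl (fun t k => t.set k '?') t,
       pvMisVec s (l.foldl (fun t k => t.set k '?') t) W,
       pvQVec (l.foldl (fun t k => t.set k '?') t) s.length W) := by
  induction l with
  | nil => intro t _ _; rfl
  | cons k tl ih =>
    intro t hb hW
    have hk : k < t.length := hb k (by simp)
    rw [List.foldl_cons, List.foldl_cons]
    by_cases hq : t.getD k '?' = '?'
    · rw [if_pos hq, pv_set_self t k hq]
      exact ih t (fun k hk => hb k (List.mem_cons_of_mem _ hk)) hW
    · rw [if_neg hq]
      have hupd := pv_upd_spec s t W (t.getD k '?') k hk rfl hq hW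
      show List.foldl _ (t.set k '?', pvUpd s W (t.getD k '?') k (pvMisVec s t W, pvQVec t s.length W)) tl = _
      rw [hupd]
      exact ih (t.set k '?') (fun k' hk' => by rw [List.length_set]; exact hb k' (List.mem_cons_of_mem _ hk'))
        (by rw [List.length_set]; exact hW)

theorem pv_stampB_spec (s t : List Char) (W i : Nat) (hi : i < W)
    (hW : W = t.length + 1 - s.length) :
    pvStampB s W i (t, pvMisVec s t W, pvQVec t s.length W)
      = (pvStamp t i s.length, pvMisVec s (pvStamp t i s.length) W,
         pvQVec (pvStamp t i s.length) s.length W) := by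
  have him : i + s.length ≤ t.length := by omega
  have hb : ∀ k ∈ List.range' i s.length, k < t.length := by
    intro k hk
    rw [List.mem_range'_1] at hk
    omega
  unfold pvStampB
  rw [pv_stampB_go s W (List.range' i s.length) t hb hW, pv_sets_eq_stamp t i s.length him]

theorem pv_passA_len (s : List Char) (W : Nat) (l : List Nat) :
    ∀ (t : List Char) (res : List Int) (ch : Bool), (∀ i ∈ l, i < W) →
    W = t.length + 1 - s.length →
    (l.foldl
      (fun st i =>
        match pvCheckA s st.1 i with
        | some true => (pvStamp st.1 i s.length, st.2.1 ++ [(i : Int)], true)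
        | _ => st) (t, res, ch)).1.length = t.length := by
  induction l with
  | nil => intro t res ch _ _; rfl
  | cons i tl ih =>
    intro t res ch hb hW
    have hi : i < W := hb i (by simp)
    have him : i + s.length ≤ t.length := by omega
    rw [List.foldl_cons]
    rcases hcheck : pvCheckA s t i with _ | b
    · simp only [hcheck]
      exact ih t res ch (fun j hj => hb j (List.mem_cons_of_mem _ hj)) hW
    · rcases b with _ | _
      · simp only [hcheck]
        exact ih t res ch (fun j hj => hb j (List.mem_cons_of_mem _ hj)) hW
      · simp only [hcheck]
        rw [ih (pvStamp t i s.length) (res ++ [(i : Int)]) true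
          (fun j hj => hb j (List.mem_cons_of_mem _ hj))
          (by rw [pv_stamp_length t i s.length him]; exact hW)]
        exact pv_stamp_length t i s.length him

theorem pv_pass_corr (s : List Char) (W : Nat) (l : List Nat) :
    ∀ (t : List Char) (res : List Int) (ch : Bool), (∀ i ∈ l, i < W) →
    W = t.length + 1 - s.length →
    l.foldl
      (fun st i =>
        if st.1.2.1.getD i 0 = 0 ∧ st.1.2.2.getD i 0 < s.length then
          (pvStampB s W i st.1, st.2.1 ++ [(i : Int)], true)
        else st)
      ((t, pvMisVec s t W, pvQVec t s.length W), res, ch)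
    = (((l.foldl
          (fun st i =>
            match pvCheckA s st.1 i with
            | some true => (pvStamp st.1 i s.length, st.2.1 ++ [(i : Int)], true)
            | _ => st) (t, res, ch)).1,
        pvMisVec s (l.foldl
          (fun st i =>
            match pvCheckA s st.1 i with
            | some true => (pvStamp st.1 i s.length, st.2.1 ++ [(i : Int)], true)
            | _ => st) (t, res, ch)).1 W,
        pvQVec (l.foldl
          (fun st i =>
            match pvCheckA s st.1 i with
            | some true => (pvStamp st.1 i s.length, st.2.1 ++ [(i : Int)], true)
            | _ => st) (t, res, ch)).1 s.length W),
       (l.foldl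
          (fun st i =>
            match pvCheckA s st.1 i with
            | some true => (pvStamp st.1 i s.length, st.2.1 ++ [(i : Int)], true)
            | _ => st) (t, res, ch)).2.1,
       (l.foldl
          (fun st i =>
            match pvCheckA s st.1 i with
            | some true => (pvStamp st.1 i s.length, st.2.1 ++ [(i : Int)], true)
            | _ => st) (t, res, ch)).2.2) := by
  induction l with
  | nil => intro t res ch _ _; rfl
  | cons i tl ih =>
    intro t res ch hb hW
    have hi : i < W := hb i (by simp)
    have him : i + s.length ≤ t.length := by omega
    have hbtl : ∀ j ∈ tl, j < W := fun j hj => hb j (List.mem_cons_of_mem _ hj)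
    rw [List.foldl_cons, List.foldl_cons]
    have hmv : (pvMisVec s t W).getD i 0 = pvMis s t i := by
      rw [pvMisVec, pv_getD_map_range, if_pos hi]
    have hqv : (pvQVec t s.length W).getD i 0 = pvQ t s.length i := by
      rw [pvQVec, pv_getD_map_range, if_pos hi]
    show tl.foldl _
        (if (pvMisVec s t W).getD i 0 = 0 ∧ (pvQVec t s.length W).getD i 0 < s.length then _ else _) = _
    rw [hmv, hqv]
    by_cases hmis0 : pvMis s t i = 0
    · by_cases hqm : pvQ t s.length i < s.length
      · rw [if_pos ⟨hmis0, hqm⟩]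
        have hcheck : pvCheckA s t i = some true := by
          rw [pv_checkA_eq, if_pos hmis0, decide_eq_true hqm]
        simp only [hcheck]
        rw [pv_stampB_spec s t W i hi hW]
        exact ih (pvStamp t i s.length) (res ++ [(i : Int)]) true hbtl
          (by rw [pv_stamp_length t i s.length him]; exact hW)
      · rw [if_neg (fun h => hqm h.2)]
        have hcheck : pvCheckA s t i = some false := by
          rw [pv_checkA_eq, if_pos hmis0, decide_eq_false hqm]
        simp only [hcheck]
        exact ih t res ch hbtl hW
    · rw [if_neg (fun h => hmis0 h.1)]
      have hcheck : pvCheckA s t i = none := by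
        rw [pv_checkA_eq, if_neg hmis0]
      simp only [hcheck]
      exact ih t res ch hbtl hW

theorem pv_passA_len' (s : List Char) (W : Nat) (t : List Char) (res : List Int) (ch : Bool)
    (hW : W = t.length + 1 - s.length) :
    (pvPassA s W (t, res, ch)).1.length = t.length := by
  unfold pvPassA
  exact pv_passA_len s W (List.range W) t res ch (fun i hi => List.mem_range.mp hi) hW

theorem pv_loop_corr (s : List Char) (W : Nat) :
    ∀ (fuel : Nat) (t : List Char) (res : List Int), W = t.length + 1 - s.length →
    pvLoopB s W fuel ((t, pvMisVec s t W, pvQVec t s.length W), res)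
      = (((pvLoopA s W fuel (t, res)).1,
          pvMisVec s (pvLoopA s W fuel (t, res)).1 W,
          pvQVec (pvLoopA s W fuel (t, res)).1 s.length W),
         (pvLoopA s W fuel (t, res)).2) := by
  intro fuel
  induction fuel with
  | zero => intro t res _; rfl
  | succ fuel ih =>
    intro t res hW
    have hpass := pv_pass_corr s W (List.range W) t res false
      (fun i hi => List.mem_range.mp hi) hW
    have hlen := pv_passA_len' s W t res false hW
    show (let st' := pvPassB s W ((t, pvMisVec s t W, pvQVec t s.length W), res, false);
      if st'.2.2 then pvLoopB s W fuel (st'.1, st'.2.1) else (st'.1, st'.2.1)) = _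
    unfold pvPassB
    rw [hpass]
    show (if (pvPassA s W (t, res, false)).2.2 then _ else _) = _
    have hA : pvLoopA s W (fuel + 1) (t, res)
        = (let st' := pvPassA s W (t, res, false);
           if st'.2.2 then pvLoopA s W fuel (st'.1, st'.2.1) else (st'.1, st'.2.1)) := rfl
    rw [hA]
    by_cases hch : (pvPassA s W (t, res, false)).2.2 = true
    · simp only [hch, if_true]
      exact ih (pvPassA s W (t, res, false)).1 (pvPassA s W (t, res, false)).2.1
        (by rw [hlen]; exact hW)
    · simp only [Bool.not_eq_true] at hch
      simp only [hch]
      rfl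

theorem pv_loopA_len (s : List Char) (W : Nat) :
    ∀ (fuel : Nat) (t : List Char) (res : List Int), W = t.length + 1 - s.length →
    (pvLoopA s W fuel (t, res)).1.length = t.length := by
  intro fuel
  induction fuel with
  | zero => intro t res _; rfl
  | succ fuel ih =>
    intro t res hW
    have hlen := pv_passA_len' s W t res false hW
    show (let st' := pvPassA s W (t, res, false);
      if st'.2.2 then pvLoopA s W fuel (st'.1, st'.2.1) else (st'.1, st'.2.1)).1.length = _
    by_cases hch : (pvPassA s W (t, res, false)).2.2 = true
    · simp only [hch, if_true]
      rw [ih (pvPassA s W (t, res, false)).1 (pvPassA s W (t, res, false)).2.1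
        (by rw [hlen]; exact hW)]
      exact hlen
    · simp only [Bool.not_eq_true] at hch
      simp only [hch]
      exact hlen

theorem main_eq (stamp target : String) :
    movesToStamp2 stamp target = movesToStamp2_alt stamp target := by
  unfold movesToStamp2 movesToStamp2_alt
  simp only []
  have hW : target.toList.length + 1 - stamp.toList.length
      = target.toList.length + 1 - stamp.toList.length := rfl
  have hcorr := pv_loop_corr stamp.toList (target.toList.length + 1 - stamp.toList.length)
    (target.toList.length + 2) target.toList [] rfl
  have hmv : (List.range (target.toList.length + 1 - stamp.toList.length)).map
      (fun w => pvMis stamp.toList target.toList w)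
      = pvMisVec stamp.toList target.toList (target.toList.length + 1 - stamp.toList.length) := rfl
  have hqv : (List.range (target.toList.length + 1 - stamp.toList.length)).map
      (fun w => pvQ target.toList stamp.toList.length w)
      = pvQVec target.toList stamp.toList.length (target.toList.length + 1 - stamp.toList.length) := rfl
  rw [hmv, hqv, hcorr]
  have hlen := pv_loopA_len stamp.toList (target.toList.length + 1 - stamp.toList.length)
    (target.toList.length + 2) target.toList [] rfl
  set L := pvLoopA stamp.toList (target.toList.length + 1 - stamp.toList.length)
    (target.toList.length + 2) (target.toList, ([] : List Int)) with hL
  have hcond : (L.1 = List.replicate target.toList.length '?')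
      ↔ (L.1.all (fun c => c == '?') = true) := by
    rw [List.all_eq_true, List.eq_replicate_iff]
    constructor
    · intro ⟨_, h⟩ c hc
      rw [beq_iff_eq]
      exact h c hc
    · intro h
      refine ⟨hlen, fun c hc => ?_⟩
      have := h c hc
      rwa [beq_iff_eq] at this
  by_cases hc : L.1 = List.replicate target.toList.length '?'
  · rw [if_pos hc, if_pos (hcond.mp hc)]
  · rw [if_neg hc, if_neg (fun h => hc (hcond.mpr h))]

-- ===== VERDICT (by name: the statement is the Claim_ definition above) =====
theorem movesToStamp2_spec : Claim_equal_movesToStamp2 := by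
  intro stamp target _
  unfold Spec_movesToStamp2
  exact main_eq stamp target
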